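-- pv_equiv track=rewrite | github.com/1mizhgun1/BKIT | RK2/main.py | task_1
-- ===== SOURCE A (Python) =====
-- def task_1(one_to_many, symbol):
--     ''' returns languages which starts with symbol and all it`s libraries'''
--     ans = {}
--     for lib_name, x, lang_name in one_to_many:
--         if lang_name[0] == symbol:
--             if lang_name in ans:
--                 ans[lang_name].append(lib_name)
--             else:
--                 ans[lang_name] = [lib_name]
--     return ans
-- ===== SOURCE B (Python) =====
-- def task_1(one_to_many, symbol):
--     ''' returns languages which starts with symbol and all it`s libraries'''
--     # pass 1: collect the distinct matching languages in first-appearance order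
--     langs = []
--     for _lib_name, _x, lang_name in one_to_many:
--         if lang_name[0] == symbol and lang_name not in langs:
--             langs.append(lang_name)
--     # pass 2: one comprehension per language gathers its libraries in input order
--     return {lang: [lib for lib, _, l in one_to_many if l == lang] for lang in langs}
-- ===== Notes on version B (the rewrite author's own statement) =====
-- stated objective: alternative
-- what changed: Replaces the single-pass incremental dict-grouping (append-or-create per entry) by a key-discovery pass that collects the distinct matching languages in first-appearance order followed by a dict comprehension that filters the whole input once per language.
import Mathlib
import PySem

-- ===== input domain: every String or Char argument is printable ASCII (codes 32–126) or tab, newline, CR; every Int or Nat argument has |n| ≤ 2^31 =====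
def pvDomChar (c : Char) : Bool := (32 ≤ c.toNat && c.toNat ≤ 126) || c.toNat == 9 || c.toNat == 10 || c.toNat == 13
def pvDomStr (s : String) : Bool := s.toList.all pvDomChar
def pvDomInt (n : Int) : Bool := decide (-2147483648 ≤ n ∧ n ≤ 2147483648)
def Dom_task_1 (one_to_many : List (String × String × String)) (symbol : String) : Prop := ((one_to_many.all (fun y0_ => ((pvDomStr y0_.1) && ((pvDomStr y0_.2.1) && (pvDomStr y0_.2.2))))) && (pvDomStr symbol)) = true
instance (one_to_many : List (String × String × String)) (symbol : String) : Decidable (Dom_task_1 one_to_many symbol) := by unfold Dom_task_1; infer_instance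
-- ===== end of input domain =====

-- B groups by a separate key-discovery pass plus one filtering comprehension per language (alternative decomposition, same results).
-- ===== PORT A =====
def task_1 (one_to_many : List (String × String × String)) (symbol : String) : List (String × List String) :=
  (one_to_many.foldl (fun ans t =>
      match PySem.Str.pyGet? t.2.2 0 with
      | none => ans      -- lang_name[0] raises IndexError in Python: excluded by Pre_task_1
      | some c =>
        if String.ofList [c] = symbol then
          if ans.contains t.2.2 then ans.insert t.2.2 (ans.getD t.2.2 [] ++ [t.1])
          else ans.insert t.2.2 [t.1]
        else ans)
    PySem.Dict.empty).items

-- ===== PORT B =====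
def task_1_alt (one_to_many : List (String × String × String)) (symbol : String) : List (String × List String) :=
  let langs := one_to_many.foldl (fun langs t =>
      match PySem.Str.pyGet? t.2.2 0 with
      | none => langs    -- lang_name[0] raises IndexError in Python: excluded by Pre_task_1
      | some c =>
        if String.ofList [c] = symbol ∧ t.2.2 ∉ langs then langs ++ [t.2.2] else langs) []
  langs.map (fun lang => (lang, (one_to_many.filter (fun t => t.2.2 == lang)).map (fun t => t.1)))

-- ===== PRECONDITION & SPEC =====
-- Pre_ excludes exactly the inputs where some language name is the empty string: there Python A raises IndexError on lang_name[0].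
def Pre_task_1 (one_to_many : List (String × String × String)) (symbol : String) : Prop :=
  ∀ t ∈ one_to_many, t.2.2 ≠ ""
instance (one_to_many : List (String × String × String)) (symbol : String) : Decidable (Pre_task_1 one_to_many symbol) := by unfold Pre_task_1; infer_instance
def pvWitness_task_1 : (List (String × String × String)) × String :=
  ([("numpy", "x", "python"), ("requests", "x", "python"), ("rails", "x", "ruby")], "p")

def Spec_task_1 (one_to_many : List (String × String × String)) (symbol : String) (out : List (String × List String)) : Prop := out = task_1_alt one_to_many symbol
instance (one_to_many : List (String × String × String)) (symbol : String) (out : List (String × List String)) : Decidable (Spec_task_1 one_to_many symbol out) := by unfold Spec_task_1; infer_instance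

-- ===== CLAIM (what is proved, stated in full; the proofs are below) =====
def Claim_equal_task_1 : Prop := ∀ (one_to_many : List (String × String × String)) (symbol : String), Dom_task_1 one_to_many symbol → Pre_task_1 one_to_many symbol → Spec_task_1 one_to_many symbol (task_1 one_to_many symbol)

-- ===== LEMMAS AND PROOFS =====

-- the per-entry guard both ports apply, as a predicate of the language string alone
def pvCond (symbol lang : String) : Bool :=
  match PySem.Str.pyGet? lang 0 with
  | none => false
  | some c => decide (String.ofList [c] = symbol)

-- A's loop body is `modify` guarded by pvCond
lemma task1_eq_modify_fold (l : List (String × String × String)) (symbol : String) :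
    task_1 l symbol =
      ((l.filter (fun t => pvCond symbol t.2.2)).foldl
        (fun d t => d.modify t.2.2 [] (fun v => v ++ [t.1])) PySem.Dict.empty).items := by
  rw [List.foldl_filter]
  unfold task_1
  congr 2
  funext ans t
  unfold pvCond
  cases h : PySem.Str.pyGet? t.2.2 0 with
  | none => simp
  | some c =>
    by_cases hs : String.ofList [c] = symbol
    · by_cases hc : ans.contains t.2.2 = true
      · simp [hs, hc, PySem.Dict.modify]
      · have h0 : ans.getD t.2.2 ([] : List String) = [] :=
          PySem.Dict.getD_of_not_contains ans [] (by simpa using hc)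
        simp [hs, hc, PySem.Dict.modify, h0]
    · simp [hs]

-- B's first pass is Set.ofList of the matching languages
lemma langs_eq_set (l : List (String × String × String)) (symbol : String) :
    l.foldl (fun langs t =>
      match PySem.Str.pyGet? t.2.2 0 with
      | none => langs
      | some c =>
        if String.ofList [c] = symbol ∧ t.2.2 ∉ langs then langs ++ [t.2.2] else langs) [] =
    PySem.Set.ofList ((l.filter (fun t => pvCond symbol t.2.2)).map (fun t => t.2.2)) := by
  rw [PySem.Set.ofList, List.foldl_map, List.foldl_filter]
  rw [show PySem.Set.empty = ([] : List String) from rfl]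
  congr 1
  funext langs t
  unfold pvCond
  cases h : PySem.Str.pyGet? t.2.2 0 with
  | none => simp
  | some c =>
    by_cases hs : String.ofList [c] = symbol
    · by_cases hm : t.2.2 ∈ langs
      · simp [hs, hm, PySem.Set.add]
      · simp [hs, hm, PySem.Set.add]
    · simp [hs]

-- a language that passes the guard picks up exactly the same entries from the full list as from the filtered one
lemma filter_lang_eq (l : List (String × String × String)) (symbol k : String)
    (hk : pvCond symbol k = true) :
    l.filter (fun t => t.2.2 == k) =
      (l.filter (fun t => pvCond symbol t.2.2)).filter (fun t => t.2.2 == k) := by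
  rw [List.filter_filter]
  apply List.filter_congr
  intro t _
  by_cases he : t.2.2 = k
  · simp [he, hk]
  · simp [he]

theorem task_1_spec_aux (l : List (String × String × String)) (symbol : String) :
    task_1 l symbol = task_1_alt l symbol := by
  rw [task1_eq_modify_fold]
  set lf := l.filter (fun t => pvCond symbol t.2.2) with hlf
  have hfold : lf.foldl (fun d t => d.modify t.2.2 [] (fun v => v ++ [t.1])) PySem.Dict.empty
      = (lf.map (fun t => (t.2.2, t.1))).foldl
          (fun d p => d.modify p.1 [] (fun v => v ++ [p.2])) PySem.Dict.empty := by
    rw [List.foldl_map]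
  have hnd : (lf.foldl (fun d t => d.modify t.2.2 [] (fun v => v ++ [t.1]))
      (PySem.Dict.empty : PySem.Dict String (List String))).keys.Nodup := by
    exact PySem.Dict.nodup_keys_foldl_modify_key lf (fun t => t.2.2) []
      (fun d t => fun v => v ++ [t.1]) PySem.Dict.empty (by simp)
  rw [PySem.Dict.items_eq_map_keys _ hnd []]
  have hkeys : (lf.foldl (fun d t => d.modify t.2.2 [] (fun v => v ++ [t.1]))
      (PySem.Dict.empty : PySem.Dict String (List String))).keys
      = PySem.Set.ofList (lf.map (fun t => t.2.2)) := by
    rw [PySem.Dict.keys_foldl_modify_key lf (fun t => t.2.2) []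
      (fun d t => fun v => v ++ [t.1]) PySem.Dict.empty]
    simp [PySem.Set.update, PySem.Set.ofList, PySem.Dict.keys_empty, PySem.Set.empty]
  unfold task_1_alt
  rw [langs_eq_set, ← hlf, hkeys]
  apply List.map_congr_left
  intro k hkmem
  have hk : pvCond symbol k = true := by
    have := (PySem.Set.mem_ofList (lf.map (fun t => t.2.2)) k).mp hkmem
    obtain ⟨t, htmem, rfl⟩ := List.mem_map.mp this
    simpa using (List.mem_filter.mp htmem).2
  have hgetD : (lf.foldl (fun d t => d.modify t.2.2 [] (fun v => v ++ [t.1]))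
      (PySem.Dict.empty : PySem.Dict String (List String))).getD k []
      = (lf.filter (fun t => t.2.2 == k)).map (fun t => t.1) := by
    rw [hfold, PySem.Dict.getD_foldl_modify_append]
    simp [List.filter_map, Function.comp_def]
  rw [hgetD, filter_lang_eq l symbol k hk, ← hlf]

-- ===== VERDICT (by name: the statement is the Claim_ definition above) =====
theorem task_1_spec : Claim_equal_task_1 := by
  intro l symbol _ _
  unfold Spec_task_1
  exact task_1_spec_aux l symbol
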